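-- pv_equiv track=rewrite | github.com/jellyfishing2346/TIP-class-assignments | Week-03/hackerrank/standard-version-b/process_strings.py | process_strings
-- ===== SOURCE A (Python) =====
-- from collections import deque
--
-- def process_strings(chars):
--     queue = deque(["start", "middle", "end"])
--     for char in chars:
--         if char.isupper():
--             queue.append(char)
--         elif queue and char.islower():
--             queue.popleft()
--     return list(queue)
-- ===== SOURCE B (Python) =====
-- def process_strings(chars):
--     full = ["start", "middle", "end"]
--     pops = 0
--     for char in chars:
--         if char.isupper():
--             full.append(char)
--         elif pops < len(full) and char.islower():
--             pops += 1
--     return full[pops:]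
-- ===== Notes on version B (the rewrite author's own statement) =====
-- stated objective: simpler
-- what changed: Replaces the deque with a plain list plus a pop counter: uppercase strings are appended, lowercase pops only advance an integer, and all front-removals happen at once as a final slice full[pops:].
import Mathlib
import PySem

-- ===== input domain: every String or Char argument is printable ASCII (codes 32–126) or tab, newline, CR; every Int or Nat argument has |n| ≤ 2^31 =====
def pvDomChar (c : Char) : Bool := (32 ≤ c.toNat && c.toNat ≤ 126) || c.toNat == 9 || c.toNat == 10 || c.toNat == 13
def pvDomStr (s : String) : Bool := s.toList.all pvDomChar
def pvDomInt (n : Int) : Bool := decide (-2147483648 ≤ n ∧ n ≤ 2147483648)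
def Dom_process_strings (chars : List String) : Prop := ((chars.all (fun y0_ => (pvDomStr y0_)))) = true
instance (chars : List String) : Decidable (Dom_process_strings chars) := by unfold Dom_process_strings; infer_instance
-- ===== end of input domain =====

-- B replaces A's deque with an append-only list plus a pop counter, slicing once at the end (objective: simpler).
-- str.isupper()/str.islower() are hand-ported (exact on the printable-ASCII domain, where cased chars are A-Z/a-z):
-- true iff some cased char exists and every cased char has the stated case.
def pyStrIsupper (s : String) : Bool :=
  s.toList.any PySem.Chars.isupper && s.toList.all (fun c => !PySem.Chars.islower c)

def pyStrIslower (s : String) : Bool :=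
  s.toList.any PySem.Chars.islower && s.toList.all (fun c => !PySem.Chars.isupper c)

-- ===== PORT A =====
def process_strings (chars : List String) : List String :=
  chars.foldl (fun queue char =>
    if pyStrIsupper char then queue ++ [char]
    else if !queue.isEmpty && pyStrIslower char then queue.tail
    else queue) ["start", "middle", "end"]

-- ===== PORT B =====
def process_strings_alt (chars : List String) : List String :=
  let st := chars.foldl (fun (st : List String × Nat) char =>
    if pyStrIsupper char then (st.1 ++ [char], st.2)
    else if decide (st.2 < st.1.length) && pyStrIslower char then (st.1, st.2 + 1)
    else st) (["start", "middle", "end"], 0)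
  st.1.drop st.2

-- ===== PRECONDITION & SPEC =====
def Spec_process_strings (chars : List String) (out : List String) : Prop := out = process_strings_alt chars
instance (chars : List String) (out : List String) : Decidable (Spec_process_strings chars out) := by unfold Spec_process_strings; infer_instance

-- ===== CLAIM (what is proved, stated in full; the proofs are below) =====
def Claim_equal_process_strings : Prop := ∀ (chars : List String), Dom_process_strings chars → Spec_process_strings chars (process_strings chars)

-- ===== LEMMAS AND PROOFS =====
-- Invariant: A's queue is B's full.drop pops, and pops ≤ full.length.
theorem process_strings_inv (chars : List String) (full : List String) (pops : Nat)
    (h : pops ≤ full.length) :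
    chars.foldl (fun queue char =>
      if pyStrIsupper char then queue ++ [char]
      else if !queue.isEmpty && pyStrIslower char then queue.tail
      else queue) (full.drop pops)
    = (fun st : List String × Nat => st.1.drop st.2)
        (chars.foldl (fun (st : List String × Nat) char =>
          if pyStrIsupper char then (st.1 ++ [char], st.2)
          else if decide (st.2 < st.1.length) && pyStrIslower char then (st.1, st.2 + 1)
          else st) (full, pops)) := by
  induction chars generalizing full pops with
  | nil => rfl
  | cons c cs ih =>
    simp only [List.foldl_cons]
    by_cases hu : pyStrIsupper c
    · rw [hu]
      simp only [if_true]
      rw [← List.drop_append_of_le_length h]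
      exact ih (full ++ [c]) pops (by simp; omega)
    · simp only [hu, if_false, Bool.false_eq_true]
      by_cases hlt : pops < full.length
      · have hne : (full.drop pops).isEmpty = false := by
          simp [List.isEmpty_iff, List.drop_eq_nil_iff]; omega
        simp only [hne, hlt, Bool.not_false, Bool.true_and, decide_true]
        by_cases hl : pyStrIslower c
        · rw [hl]
          simp only [if_true]
          rw [List.tail_drop]
          exact ih full (pops + 1) (by omega)
        · simp only [hl, if_false, Bool.false_eq_true]
          exact ih full pops h
      · have hpe : pops = full.length := by omega
        have hne : (full.drop pops).isEmpty = true := by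
          simp [List.isEmpty_iff, List.drop_eq_nil_iff]; omega
        simp only [hne, hlt, Bool.not_true, Bool.false_and, decide_false,
          if_false, Bool.false_eq_true, List.tail_drop]
        exact ih full pops h

-- ===== VERDICT (by name: the statement is the Claim_ definition above) =====
theorem process_strings_spec : Claim_equal_process_strings := by
  intro chars _
  unfold Spec_process_strings process_strings process_strings_alt
  simpa using process_strings_inv chars ["start", "middle", "end"] 0 (by simp)
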